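-- pv_equiv track=rewrite | github.com/Solaris11/market-alpha-scanner | dashboard_views/shared.py | _action_tone
-- ===== SOURCE A (Python) =====
-- def _action_tone(value: object) -> str:
--     text = str(value or "").upper()
--     if any(token in text for token in ("STRONG BUY", "BUY", "ACCUMULATE", "ADD", "LONG")):
--         return "positive"
--     if any(token in text for token in ("SELL", "AVOID", "SHORT", "REDUCE")):
--         return "negative"
--     if any(token in text for token in ("WATCH", "WAIT", "HOLD", "PASS")):
--         return "neutral"
--     return "accent"
-- ===== SOURCE B (Python) =====
-- _TOKEN_RANK = (
--     ("BUY", 0), ("ACCUMULATE", 0), ("ADD", 0), ("LONG", 0),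
--     ("SELL", 1), ("AVOID", 1), ("SHORT", 1), ("REDUCE", 1),
--     ("WATCH", 2), ("WAIT", 2), ("HOLD", 2), ("PASS", 2),
-- )
-- _TONES = ("positive", "negative", "neutral", "accent")
--
--
-- def _action_tone(value: object) -> str:
--     # Single left-to-right scan over the text's suffixes keeping the minimum
--     # rank of any token that starts there ("STRONG BUY" is redundant: it
--     # contains "BUY", which has the same rank).
--     text = str(value or "").upper()
--     best = 3
--     while text:
--         for token, rank in _TOKEN_RANK:
--             if rank < best and text.startswith(token):
--                 best = rank
--         text = text[1:]
--     return _TONES[best]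
-- ===== Notes on version B (the rewrite author's own statement) =====
-- stated objective: alternative
-- what changed: Replaces A's three staged any-substring-membership branches by a single left-to-right scan over the text's suffixes that keeps the running minimum rank of any token starting at each position (the redundant 'STRONG BUY' token is dropped since it contains 'BUY'), then maps the final rank through a tone table.
import Mathlib
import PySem

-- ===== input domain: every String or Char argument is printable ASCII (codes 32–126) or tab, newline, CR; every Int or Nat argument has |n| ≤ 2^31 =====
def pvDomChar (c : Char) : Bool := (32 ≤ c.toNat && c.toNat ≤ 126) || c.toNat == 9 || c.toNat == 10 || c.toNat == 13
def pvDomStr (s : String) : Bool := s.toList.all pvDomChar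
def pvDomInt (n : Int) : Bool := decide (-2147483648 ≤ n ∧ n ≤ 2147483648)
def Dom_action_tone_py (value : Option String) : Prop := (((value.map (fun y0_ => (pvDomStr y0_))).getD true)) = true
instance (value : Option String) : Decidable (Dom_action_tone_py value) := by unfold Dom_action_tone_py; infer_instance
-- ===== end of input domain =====

-- B replaces A's three staged any-substring-membership branches by a single left-to-right
-- scan over the text's suffixes that keeps the minimum rank of any token starting there
-- (objective: alternative algorithm, same return value).

-- ===== PORT A =====
def action_tone_py (value : Option String) : String :=
  let text := PySem.Str.upper (value.getD "")
  if (["STRONG BUY", "BUY", "ACCUMULATE", "ADD", "LONG"].any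
      (fun token => PySem.Str.isIn token text)) then "positive"
  else if (["SELL", "AVOID", "SHORT", "REDUCE"].any
      (fun token => PySem.Str.isIn token text)) then "negative"
  else if (["WATCH", "WAIT", "HOLD", "PASS"].any
      (fun token => PySem.Str.isIn token text)) then "neutral"
  else "accent"

-- ===== PORT B =====
-- _TOKEN_RANK and _TONES from Source B
def pvTokenRank : List (String × Nat) :=
  [("BUY", 0), ("ACCUMULATE", 0), ("ADD", 0), ("LONG", 0),
   ("SELL", 1), ("AVOID", 1), ("SHORT", 1), ("REDUCE", 1),
   ("WATCH", 2), ("WAIT", 2), ("HOLD", 2), ("PASS", 2)]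

def pvTones : List String := ["positive", "negative", "neutral", "accent"]

-- Source B's `while text:` loop, one character dropped per step (text[1:] on a string is
-- exactly the tail of its character list), keeping the running minimum rank `best`
def pvScan : List Char → Nat → Nat
  | [], best => best
  | c :: rest, best =>
      pvScan rest (pvTokenRank.foldl
        (fun b p => if p.2 < b && PySem.Chars.startswith (c :: rest) p.1.toList then p.2 else b)
        best)

def action_tone_py_alt (value : Option String) : String :=
  let text := PySem.Str.upper (value.getD "")
  let best := pvScan text.toList 3
  -- _TONES[best]: best ≤ 3 always, so the indexing never fails; `getD ""` is unreachable
  (PySem.List.pyGet? pvTones (best : Int)).getD ""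

-- ===== PRECONDITION & SPEC =====
def Spec_action_tone_py (value : Option String) (out : String) : Prop := out = action_tone_py_alt value
instance (value : Option String) (out : String) : Decidable (Spec_action_tone_py value out) := by unfold Spec_action_tone_py; infer_instance

-- ===== CLAIM (what is proved, stated in full; the proofs are below) =====
def Claim_equal_action_tone_py : Prop := ∀ (value : Option String), Dom_action_tone_py value → Spec_action_tone_py value (action_tone_py value)

-- ===== LEMMAS AND PROOFS =====

-- the inner for-loop: the result is ≤ r iff best was, or some table token of rank ≤ r starts the suffix
lemma foldl_step_le (tbl : List (String × Nat)) (t : List Char) (best r : Nat) :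
    (tbl.foldl (fun b p => if p.2 < b && PySem.Chars.startswith t p.1.toList then p.2 else b) best) ≤ r
    ↔ best ≤ r ∨ ∃ p ∈ tbl, p.2 ≤ r ∧ PySem.Chars.startswith t p.1.toList = true := by
  induction tbl generalizing best with
  | nil => simp
  | cons q tbl ih =>
    simp only [List.foldl_cons, List.mem_cons]
    by_cases hs : PySem.Chars.startswith t q.1.toList = true
    · by_cases hlt : q.2 < best
      · rw [if_pos (by simp [hs, hlt]), ih]
        constructor
        · rintro (h | h)
          · exact Or.inr ⟨q, Or.inl rfl, h, hs⟩
          · exact Or.inr (h.imp fun p hp => ⟨Or.inr hp.1, hp.2⟩)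
        · rintro (h | ⟨p, hp | hp, h2, h3⟩)
          · exact Or.inl (by omega)
          · subst hp; exact Or.inl h2
          · exact Or.inr ⟨p, hp, h2, h3⟩
      · rw [if_neg (by simp [hs, hlt]), ih]
        constructor
        · rintro (h | h)
          · exact Or.inl h
          · exact Or.inr (h.imp fun p hp => ⟨Or.inr hp.1, hp.2⟩)
        · rintro (h | ⟨p, hp | hp, h2, h3⟩)
          · exact Or.inl h
          · subst hp; exact Or.inl (by omega)
          · exact Or.inr ⟨p, hp, h2, h3⟩
    · rw [if_neg (by simp [hs]), ih]
      constructor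
      · rintro (h | h)
        · exact Or.inl h
        · exact Or.inr (h.imp fun p hp => ⟨Or.inr hp.1, hp.2⟩)
      · rintro (h | ⟨p, hp | hp, h2, h3⟩)
        · exact Or.inl h
        · subst hp; exact absurd h3 hs
        · exact Or.inr ⟨p, hp, h2, h3⟩

-- the outer while-loop: the result is ≤ r iff best was, or some token of rank ≤ r starts some suffix
lemma pvScan_le (l : List Char) (best r : Nat) :
    pvScan l best ≤ r
    ↔ best ≤ r ∨ ∃ j, ∃ p ∈ pvTokenRank, p.2 ≤ r ∧ PySem.Chars.startswith (l.drop j) p.1.toList = true := by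
  induction l generalizing best with
  | nil =>
    simp only [pvScan, List.drop_nil]
    constructor
    · exact Or.inl
    · rintro (h | ⟨j, p, hp, h2, h3⟩)
      · exact h
      · rw [PySem.Chars.startswith_iff, List.prefix_nil] at h3
        revert h2; fin_cases hp <;> simp_all
  | cons c rest ih =>
    simp only [pvScan, ih, foldl_step_le]
    constructor
    · rintro ((h | h) | ⟨j, h⟩)
      · exact Or.inl h
      · exact Or.inr ⟨0, h⟩
      · exact Or.inr ⟨j + 1, h⟩
    · rintro (h | ⟨j, h⟩)
      · exact Or.inl (Or.inl h)
      · cases j with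
        | zero => exact Or.inl (Or.inr h)
        | succ j => exact Or.inr ⟨j, h⟩

-- ===== VERDICT (by name: the statement is the Claim_ definition above) =====
theorem action_tone_py_spec : Claim_equal_action_tone_py := by
  intro value _
  show action_tone_py value = action_tone_py_alt value
  unfold action_tone_py action_tone_py_alt
  generalize PySem.Str.upper (value.getD "") = t
  simp only
  generalize hg : pvScan t.toList 3 = n
  have h3 : n ≤ 3 := hg ▸ (pvScan_le _ 3 3).mpr (Or.inl le_rfl)
  have key : ∀ r, r < 3 → (n ≤ r ↔ ∃ p ∈ pvTokenRank, p.2 ≤ r ∧ PySem.Str.isIn p.1 t = true) := by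
    intro r hr
    rw [← hg, pvScan_le]
    constructor
    · rintro (h | ⟨j, p, hp, h2, h3'⟩)
      · omega
      · refine ⟨p, hp, h2, ?_⟩
        rw [PySem.Str.isIn_iff_infix]
        rw [PySem.Chars.startswith_iff] at h3'
        exact h3'.isInfix.trans (List.drop_suffix j t.toList).isInfix
    · rintro ⟨p, hp, h2, h3'⟩
      rw [PySem.Str.isIn_iff_infix] at h3'
      obtain ⟨j, hj⟩ := (PySem.Chars.exists_prefix_drop_iff_isIn p.1.toList t.toList).mpr
        ((PySem.Chars.isIn_iff_infix _ _).mpr h3')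
      exact Or.inr ⟨j, p, hp, h2, (PySem.Chars.startswith_iff _ _).mpr hj⟩
  have e0 : n ≤ 0 ↔ (PySem.Str.isIn "BUY" t = true ∨ PySem.Str.isIn "ACCUMULATE" t = true ∨
      PySem.Str.isIn "ADD" t = true ∨ PySem.Str.isIn "LONG" t = true) := by
    rw [key 0 (by omega)]; simp [pvTokenRank]
  have e1 : n ≤ 1 ↔ (PySem.Str.isIn "BUY" t = true ∨ PySem.Str.isIn "ACCUMULATE" t = true ∨
      PySem.Str.isIn "ADD" t = true ∨ PySem.Str.isIn "LONG" t = true ∨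
      PySem.Str.isIn "SELL" t = true ∨ PySem.Str.isIn "AVOID" t = true ∨
      PySem.Str.isIn "SHORT" t = true ∨ PySem.Str.isIn "REDUCE" t = true) := by
    rw [key 1 (by omega)]; simp [pvTokenRank]
  have e2 : n ≤ 2 ↔ (PySem.Str.isIn "BUY" t = true ∨ PySem.Str.isIn "ACCUMULATE" t = true ∨
      PySem.Str.isIn "ADD" t = true ∨ PySem.Str.isIn "LONG" t = true ∨
      PySem.Str.isIn "SELL" t = true ∨ PySem.Str.isIn "AVOID" t = true ∨
      PySem.Str.isIn "SHORT" t = true ∨ PySem.Str.isIn "REDUCE" t = true ∨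
      PySem.Str.isIn "WATCH" t = true ∨ PySem.Str.isIn "WAIT" t = true ∨
      PySem.Str.isIn "HOLD" t = true ∨ PySem.Str.isIn "PASS" t = true) := by
    rw [key 2 (by omega)]; simp [pvTokenRank]
  have sb : PySem.Str.isIn "STRONG BUY" t = true → PySem.Str.isIn "BUY" t = true := by
    intro h
    rw [PySem.Str.isIn_iff_infix] at h ⊢
    exact (show "BUY".toList <:+: "STRONG BUY".toList by decide).trans h
  simp only [List.any_cons, List.any_nil, Bool.or_eq_true, Bool.or_false]
  split_ifs with h1 h2 h4
  · have hz : n = 0 := by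
      have : n ≤ 0 := by
        apply e0.mpr
        rcases h1 with h | h | h | h | h
        · exact Or.inl (sb h)
        · exact Or.inl h
        · exact Or.inr (Or.inl h)
        · exact Or.inr (Or.inr (Or.inl h))
        · exact Or.inr (Or.inr (Or.inr h))
      omega
    subst hz; decide
  · simp only [not_or] at h1
    obtain ⟨a1, a2, a3, a4, a5⟩ := h1
    have hlo : ¬ n ≤ 0 := fun hc => by
      rcases e0.mp hc with h | h | h | h
      exacts [a2 h, a3 h, a4 h, a5 h]
    have hhi : n ≤ 1 := by
      apply e1.mpr
      rcases h2 with h | h | h | h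
      · exact Or.inr (Or.inr (Or.inr (Or.inr (Or.inl h))))
      · exact Or.inr (Or.inr (Or.inr (Or.inr (Or.inr (Or.inl h)))))
      · exact Or.inr (Or.inr (Or.inr (Or.inr (Or.inr (Or.inr (Or.inl h))))))
      · exact Or.inr (Or.inr (Or.inr (Or.inr (Or.inr (Or.inr (Or.inr h))))))
    have hz : n = 1 := by omega
    subst hz; decide
  · simp only [not_or] at h1 h2
    obtain ⟨a1, a2, a3, a4, a5⟩ := h1
    obtain ⟨b1, b2, b3, b4⟩ := h2
    have hlo : ¬ n ≤ 1 := fun hc => by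
      rcases e1.mp hc with h | h | h | h | h | h | h | h
      exacts [a2 h, a3 h, a4 h, a5 h, b1 h, b2 h, b3 h, b4 h]
    have hhi : n ≤ 2 := by
      apply e2.mpr
      rcases h4 with h | h | h | h
      · exact Or.inr (Or.inr (Or.inr (Or.inr (Or.inr (Or.inr (Or.inr (Or.inr (Or.inl h))))))))
      · exact Or.inr (Or.inr (Or.inr (Or.inr (Or.inr (Or.inr (Or.inr (Or.inr (Or.inr (Or.inl h)))))))))
      · exact Or.inr (Or.inr (Or.inr (Or.inr (Or.inr (Or.inr (Or.inr (Or.inr (Or.inr (Or.inr (Or.inl h))))))))))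
      · exact Or.inr (Or.inr (Or.inr (Or.inr (Or.inr (Or.inr (Or.inr (Or.inr (Or.inr (Or.inr (Or.inr h))))))))))
    have hz : n = 2 := by omega
    subst hz; decide
  · simp only [not_or] at h1 h2 h4
    obtain ⟨a1, a2, a3, a4, a5⟩ := h1
    obtain ⟨b1, b2, b3, b4⟩ := h2
    obtain ⟨c1, c2, c3, c4⟩ := h4
    have hlo : ¬ n ≤ 2 := fun hc => by
      rcases e2.mp hc with h | h | h | h | h | h | h | h | h | h | h | h
      exacts [a2 h, a3 h, a4 h, a5 h, b1 h, b2 h, b3 h, b4 h, c1 h, c2 h, c3 h, c4 h]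
    have hz : n = 3 := by omega
    subst hz; decide
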